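-- pv_equiv track=rewrite | github.com/Johan2403/anti-roller | antiroller/lyrics_detect.py | check_lyrics
-- ===== SOURCE A (Python) =====
-- lyrics = [
--     "nevergonna",
--     "nevergonnagiveyouup",
--     "nevergonnaletyoudown",
--     "nevergonnarunaround",
--     "anddesertyou",
--     "nevergonnamakeyoucry",
--     "nevergonnasaygoodbye",
--     "nevergonnatellalie",
--     "andhurtyou",
--     "nevergon",
--     "giveuup"
-- ]
--
-- chars = [' ', '`', '~', '!', '@', '#', '$', '%', '^',
--             '&', '*', '(', ')', '-', '_', '+', '=',
--             '[', ']', '{', '}', ':', ';', '|', '\\',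
--             ',', '.', '<', '>', '/', '?']
--
-- def check_lyrics(message):
--     # process the string
--     for char in chars:
--         if char in message:
--             message = message.replace(char, '')
--
--     if len(message) == 1:
--         return True
--
--     for line in lyrics:
--         if line in message.lower():
--             return True
--
--     return False
-- ===== SOURCE B (Python) =====
-- lyrics = [
--     "nevergonna",
--     "nevergonnagiveyouup",
--     "nevergonnaletyoudown",
--     "nevergonnarunaround",
--     "anddesertyou",
--     "nevergonnamakeyoucry",
--     "nevergonnasaygoodbye",
--     "nevergonnatellalie",
--     "andhurtyou",
--     "nevergon",
--     "giveuup"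
-- ]
--
-- chars = [' ', '`', '~', '!', '@', '#', '$', '%', '^',
--             '&', '*', '(', ')', '-', '_', '+', '=',
--             '[', ']', '{', '}', ':', ';', '|', '\\',
--             ',', '.', '<', '>', '/', '?']
--
-- _removal = frozenset(chars)
--
-- def check_lyrics(message):
--     # one pass over the message instead of 31 whole-message replace scans
--     cleaned = ''.join(ch for ch in message if ch not in _removal)
--     if len(cleaned) == 1:
--         return True
--     lowered = cleaned.lower()
--     return any(line in lowered for line in lyrics)
-- ===== Notes on version B (the rewrite author's own statement) =====
-- stated objective: idiomatic
-- what changed: Replaces the 31-iteration loop of whole-message str.replace scans with a single filtering pass over the message using a frozenset of removal characters, and the lyric loop with any(); the len==1 guard and lowercase-only-for-lyrics behaviour are kept exactly.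
import Mathlib
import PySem

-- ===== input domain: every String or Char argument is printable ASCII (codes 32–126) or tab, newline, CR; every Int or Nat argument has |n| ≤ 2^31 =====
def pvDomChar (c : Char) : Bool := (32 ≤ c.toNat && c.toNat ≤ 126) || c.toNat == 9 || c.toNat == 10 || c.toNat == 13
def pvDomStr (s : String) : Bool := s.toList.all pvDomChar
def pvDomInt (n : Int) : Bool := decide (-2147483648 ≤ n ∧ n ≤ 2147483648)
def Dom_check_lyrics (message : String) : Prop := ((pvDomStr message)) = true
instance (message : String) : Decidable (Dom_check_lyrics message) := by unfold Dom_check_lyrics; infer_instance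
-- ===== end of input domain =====

-- B replaces the 31 whole-message replace scans with one filtering pass over the
-- message using a set of removal characters (idiomatic; same behaviour, incl. the len==1 → True guard).


-- module-level constants shared by both Pythons (Source A's `lyrics`; `chars` holds
-- 1-char strings, represented by their Char)
def pvLyrics : List String :=
  ["nevergonna", "nevergonnagiveyouup", "nevergonnaletyoudown", "nevergonnarunaround",
   "anddesertyou", "nevergonnamakeyoucry", "nevergonnasaygoodbye", "nevergonnatellalie",
   "andhurtyou", "nevergon", "giveuup"]

def pvChars : List Char :=
  [' ', '`', '~', '!', '@', '#', '$', '%', '^',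
   '&', '*', '(', ')', '-', '_', '+', '=',
   '[', ']', '{', '}', ':', ';', '|', '\\',
   ',', '.', '<', '>', '/', '?']

-- ===== PORT A =====
-- for char in chars: if char in message: message = message.replace(char, '')
def check_lyrics (message : String) : Bool :=
  let m := pvChars.foldl (fun m c =>
    if PySem.Str.isIn (String.singleton c) m
    then PySem.Str.replace m (String.singleton c) "" else m) message
  if PySem.Str.len m == 1 then true
  else pvLyrics.any (fun line => PySem.Str.isIn line (PySem.Str.lower m))

-- ===== PORT B =====
def pvRemoval : PySem.Set Char := PySem.Set.ofList pvChars   -- _removal = frozenset(chars)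

-- cleaned = ''.join(ch for ch in message if ch not in _removal)
def check_lyrics_alt (message : String) : Bool :=
  let cleaned := String.ofList (message.toList.filter (fun ch => !(PySem.Set.contains pvRemoval ch)))
  if PySem.Str.len cleaned == 1 then true
  else
    let lowered := PySem.Str.lower cleaned
    pvLyrics.any (fun line => PySem.Str.isIn line lowered)

-- ===== PRECONDITION & SPEC =====
def Spec_check_lyrics (message : String) (out : Bool) : Prop := out = check_lyrics_alt message
instance (message : String) (out : Bool) : Decidable (Spec_check_lyrics message out) := by unfold Spec_check_lyrics; infer_instance

-- ===== CLAIM (what is proved, stated in full; the proofs are below) =====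
def Claim_equal_check_lyrics : Prop := ∀ (message : String), Dom_check_lyrics message → Spec_check_lyrics message (check_lyrics message)

-- ===== LEMMAS AND PROOFS =====

-- replace.go with a single-char pattern and empty replacement filters that char out
theorem pv_go_sing (c : Char) : ∀ (fuel : Nat) (l acc : List Char), l.length ≤ fuel →
    PySem.Chars.replace.go [c] [] fuel l acc = acc.reverse ++ l.filter (· != c) := by
  intro fuel
  induction fuel with
  | zero => intro l acc h; rw [PySem.Chars.replace.go]; simp at h; simp [h]
  | succ n ih =>
    intro l acc h
    cases l with
    | nil => rw [PySem.Chars.replace.go]; simp; omega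
    | cons x t =>
      rw [PySem.Chars.replace.go]
      by_cases hx : x = c
      · subst hx
        simp [List.isPrefixOf, ih t _ (by simpa using Nat.le_of_succ_le_succ h)]
      · rw [if_neg (by simp [List.isPrefixOf, Ne.symm hx]),
          ih t _ (by simpa using Nat.le_of_succ_le_succ h)]
        simp [bne_iff_ne, hx]

theorem pv_replace_sing (c : Char) (l : List Char) :
    PySem.Chars.replace l [c] [] = l.filter (· != c) := by
  rw [PySem.Chars.replace]
  simp [pv_go_sing c l.length l [] (le_refl _)]

-- one step of A's loop filters the char out (the `if char in message` guard is a no-op)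
theorem pv_step_toList (c : Char) (m : String) :
    (if PySem.Str.isIn (String.singleton c) m
     then PySem.Str.replace m (String.singleton c) "" else m).toList
      = m.toList.filter (· != c) := by
  by_cases h : PySem.Str.isIn (String.singleton c) m = true
  · rw [if_pos h, PySem.Str.toList_replace]
    simp [pv_replace_sing]
  · rw [if_neg h]
    have hmem : c ∉ m.toList := by
      intro hc
      apply h
      rw [PySem.Str.isIn_iff_infix]
      obtain ⟨s1, t1, hst⟩ := List.append_of_mem hc
      exact ⟨s1, t1, by simp [hst]⟩
    exact (List.filter_eq_self.mpr (fun a ha => by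
      simp [bne_iff_ne]; rintro rfl; exact hmem ha)).symm

-- folding A's step over a char list filters out all of them
theorem pv_fold_toList : ∀ (cs : List Char) (m : String),
    (cs.foldl (fun m c =>
      if PySem.Str.isIn (String.singleton c) m
      then PySem.Str.replace m (String.singleton c) "" else m) m).toList
      = m.toList.filter (fun x => !(cs.contains x)) := by
  intro cs
  induction cs with
  | nil => intro m; simp
  | cons c t ih =>
    intro m
    rw [List.foldl_cons, ih, pv_step_toList, List.filter_filter]
    apply List.filter_congr
    intro x _
    by_cases hx : x = c <;> simp [hx, bne_iff_ne]

-- the two cleaned strings coincide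
theorem pv_cleaned_eq (m : String) :
    (pvChars.foldl (fun m c =>
      if PySem.Str.isIn (String.singleton c) m
      then PySem.Str.replace m (String.singleton c) "" else m) m)
      = String.ofList (m.toList.filter (fun ch => !(PySem.Set.contains pvRemoval ch))) := by
  have h1 := pv_fold_toList pvChars m
  have h2 : ∀ x : Char, PySem.Set.contains pvRemoval x = pvChars.contains x := by
    have hs : pvRemoval = pvChars := by decide
    intro x
    rw [hs]
    rfl
  have : (m.toList.filter (fun x => !(pvChars.contains x)))
      = m.toList.filter (fun ch => !(PySem.Set.contains pvRemoval ch)) := by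
    apply List.filter_congr
    intro x _
    rw [h2 x]
  calc _ = String.ofList ((pvChars.foldl _ m).toList) := by rw [String.ofList_toList]
    _ = _ := by rw [h1, this]

-- ===== VERDICT (by name: the statement is the Claim_ definition above) =====
theorem check_lyrics_spec : Claim_equal_check_lyrics := by
  intro message _
  unfold Spec_check_lyrics check_lyrics check_lyrics_alt
  rw [pv_cleaned_eq]
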